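-- pv_equiv track=rewrite | github.com/hzl1216/gdapgcn | code/disease_similarity.py | all_ancestor
-- ===== SOURCE A (Python) =====
-- def all_ancestor(tree_addresses):
--     ancestors = set()
--     for tree_address in tree_addresses :
--         segment = tree_address.split('.')
--         base = segment[0]
--         ancestors.add(base)
--         for i in range(1,len(segment)):
--             base = base + '.' + segment[i]
--             ancestors.add(base)
--     return ancestors
-- ===== SOURCE B (Python) =====
-- def all_ancestor(tree_addresses):
--     # Scan each address for '.' positions and emit prefix slices directly;
--     # no split() and no running concatenation.
--     ancestors = set()
--     for addr in tree_addresses: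
--         for i, ch in enumerate(addr):
--             if ch == '.':
--                 ancestors.add(addr[:i])
--         ancestors.add(addr)
--     return ancestors
-- ===== Notes on version B (the rewrite author's own statement) =====
-- stated objective: alternative
-- what changed: B derives every ancestor as a slice addr[:i] at each dot position (plus the full address) instead of A's split-into-segments and rebuild-by-concatenation with a running base string.
import Mathlib
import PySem

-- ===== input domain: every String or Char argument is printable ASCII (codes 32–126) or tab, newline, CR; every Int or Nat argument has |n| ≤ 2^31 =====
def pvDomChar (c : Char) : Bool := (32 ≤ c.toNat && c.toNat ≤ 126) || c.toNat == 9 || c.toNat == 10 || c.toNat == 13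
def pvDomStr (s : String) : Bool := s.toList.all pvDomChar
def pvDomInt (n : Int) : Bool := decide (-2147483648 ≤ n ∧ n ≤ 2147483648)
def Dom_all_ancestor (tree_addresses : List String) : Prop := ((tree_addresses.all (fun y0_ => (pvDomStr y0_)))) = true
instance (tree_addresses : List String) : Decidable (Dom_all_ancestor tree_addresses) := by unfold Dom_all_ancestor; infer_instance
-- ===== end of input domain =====

-- B replaces A's split-into-segments-and-rebuild with a direct scan over dot
-- positions emitting prefix slices (objective: alternative; same cost).


-- ===== PORT A =====
-- segment[0] is ported as headD [] : split always returns a non-empty list, so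
-- Python's segment[0] never raises.  Strings are handled via toList/ofList so the
-- kernel can evaluate them; concatenation of char lists is exact for str '+'.
def all_ancestor (tree_addresses : List String) : List String :=
  tree_addresses.foldl (fun ancestors tree_address =>
    let segment : List (List Char) := PySem.Chars.splitOn tree_address.toList ['.']
    let base := segment.headD []
    let ancestors := PySem.Set.add ancestors (String.ofList base)
    let st := (PySem.List.pyRange 1 (PySem.List.len segment)).foldl
      (fun (st : PySem.Set String × List Char) i =>
        let b := st.2 ++ ['.'] ++ PySem.List.pyGetD segment i []
        (PySem.Set.add st.1 (String.ofList b), b)) (ancestors, base)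
    st.1) PySem.Set.empty

-- ===== PORT B =====
def all_ancestor_alt (tree_addresses : List String) : List String :=
  tree_addresses.foldl (fun ancestors addr =>
    let anc := (PySem.List.enumerate addr.toList).foldl
      (fun anc (p : Int × Char) =>
        if p.2 == '.' then
          PySem.Set.add anc (String.ofList (PySem.Chars.slice addr.toList none (some p.1)))
        else anc) ancestors
    PySem.Set.add anc addr) PySem.Set.empty

-- ===== PRECONDITION & SPEC =====
def Spec_all_ancestor (tree_addresses : List String) (out : List String) : Prop := out = all_ancestor_alt tree_addresses
instance (tree_addresses : List String) (out : List String) : Decidable (Spec_all_ancestor tree_addresses out) := by unfold Spec_all_ancestor; infer_instance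

-- ===== CLAIM (what is proved, stated in full; the proofs are below) =====
def Claim_equal_all_ancestor : Prop := ∀ (tree_addresses : List String), Dom_all_ancestor tree_addresses → Spec_all_ancestor tree_addresses (all_ancestor tree_addresses)

-- ===== LEMMAS AND PROOFS =====

-- split at '.' as a (head, tail) pair, structural recursion on the characters
def sp : List Char → List Char × List (List Char)
  | [] => ([], [])
  | c :: cs => if c = '.' then ([], (sp cs).1 :: (sp cs).2)
               else (c :: (sp cs).1, (sp cs).2)

-- split with a pending prefix (accumulator form of splitOn.go)
def msp (pre : List Char) : List Char → List (List Char)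
  | [] => [pre]
  | c :: cs => if c = '.' then pre :: msp [] cs else msp (pre ++ [c]) cs

-- the list of strings A's inner loop adds after the first segment
def sj (base : List Char) : List (List Char) → List (List Char)
  | [] => []
  | s :: rest => (base ++ '.' :: s) :: sj (base ++ '.' :: s) rest

-- prefixes of cs at its dot positions, in increasing order
def dp : List Char → List (List Char)
  | [] => []
  | c :: cs => if c = '.' then [] :: (dp cs).map ('.' :: ·)
               else (dp cs).map (c :: ·)

theorem go_eq_msp (fuel : Nat) : ∀ (l cur : List Char) (acc : List (List Char)),
    l.length + 1 ≤ fuel →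
    PySem.Chars.splitOn.go ['.'] fuel l cur acc = acc.reverse ++ msp cur.reverse l := by
  induction fuel with
  | zero => intro l cur acc h; omega
  | succ n ih =>
    intro l cur acc h
    cases l with
    | nil => simp [PySem.Chars.splitOn.go, msp]
    | cons c rest =>
      by_cases hc : c = '.'
      · subst hc
        have : List.isPrefixOf ['.'] ('.' :: rest) = true := by
          simp [List.isPrefixOf]
        rw [PySem.Chars.splitOn.go]
        simp only [this, if_pos]
        rw [ih _ _ _ (by simpa using Nat.le_of_succ_le_succ h)]
        simp [msp]
      · have : List.isPrefixOf ['.'] (c :: rest) = false := by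
          simp [List.isPrefixOf]; exact fun h => hc h.symm
        rw [PySem.Chars.splitOn.go]
        simp only [this, Bool.false_eq_true, if_neg, not_false_iff]
        rw [ih _ _ _ (by simpa using Nat.le_of_succ_le_succ h)]
        simp [msp, hc]

theorem msp_eq_sp (l : List Char) : ∀ pre, msp pre l = (pre ++ (sp l).1) :: (sp l).2 := by
  induction l with
  | nil => intro pre; simp [msp, sp]
  | cons c cs ih =>
    intro pre
    by_cases hc : c = '.'
    · subst hc; simp [msp, sp, ih]
    · simp [msp, sp, hc, ih]

theorem splitOn_eq_sp (cs : List Char) :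
    PySem.Chars.splitOn cs ['.'] = (sp cs).1 :: (sp cs).2 := by
  rw [PySem.Chars.splitOn, go_eq_msp _ _ _ _ (by omega)]
  simp [msp_eq_sp]

theorem sj_shift (l : List (List Char)) : ∀ a b, sj (a ++ b) l = (sj b l).map (a ++ ·) := by
  induction l with
  | nil => intro a b; simp [sj]
  | cons s rest ih =>
    intro a b
    simp only [sj, List.map]
    rw [show a ++ b ++ '.' :: s = a ++ (b ++ '.' :: s) by simp, ih]

theorem sj_cons (c : Char) (b : List Char) (l : List (List Char)) :
    sj (c :: b) l = (sj b l).map (c :: ·) := by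
  simpa using sj_shift l [c] b

-- A's added strings equal B's added strings, per address
theorem main_adds (cs : List Char) :
    (sp cs).1 :: sj (sp cs).1 (sp cs).2 = dp cs ++ [cs] := by
  induction cs with
  | nil => simp [sp, sj, dp]
  | cons c cs ih =>
    by_cases hc : c = '.'
    · subst hc
      simp only [sp, dp]
      cases hsp : sp cs with
      | mk h t =>
        rw [hsp] at ih
        simp only [reduceIte] at ih ⊢
        rw [show sj [] ((h:List Char) :: t) = ('.' :: h) :: sj ('.' :: h) t from rfl,
            sj_cons]
        have : ('.' :: h) :: (sj h t).map ('.' :: ·) = ((h :: sj h t).map ('.' :: ·)) := rfl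
        rw [this, ih]
        simp
    · simp only [sp, dp, if_neg hc]
      rw [sj_cons]
      have : (c :: (sp cs).1) :: (sj (sp cs).1 (sp cs).2).map (c :: ·)
           = ((sp cs).1 :: sj (sp cs).1 (sp cs).2).map (c :: ·) := rfl
      rw [this, ih]
      simp

-- A's inner fold over the remaining segments
theorem loopA (t : List (List Char)) : ∀ (anc : PySem.Set String) (b : List Char),
    (t.foldl (fun (st : PySem.Set String × List Char) s =>
        (PySem.Set.add st.1 (String.ofList (st.2 ++ ['.'] ++ s)), st.2 ++ ['.'] ++ s)) (anc, b)).1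
    = PySem.Set.update anc ((sj b t).map String.ofList) := by
  induction t with
  | nil => intro anc b; simp [sj, PySem.Set.update]
  | cons s rest ih =>
    intro anc b
    simp only [List.foldl, sj, List.map]
    rw [ih]
    simp [PySem.Set.update]

-- B's inner fold over the enumerated characters
theorem loopB (cs : List Char) : ∀ (anc : PySem.Set String) (pre : List Char),
    ((PySem.List.enumerate cs (pre.length : Int)).foldl
      (fun anc (p : Int × Char) =>
        if p.2 == '.' then
          PySem.Set.add anc (String.ofList (PySem.Chars.slice (pre ++ cs) none (some p.1)))
        else anc) anc)
    = PySem.Set.update anc ((dp cs).map (fun l => String.ofList (pre ++ l))) := by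
  induction cs with
  | nil => intro anc pre; simp [PySem.List.enumerate, dp, PySem.Set.update]
  | cons c cs ih =>
    intro anc pre
    simp only [PySem.List.enumerate, List.foldl]
    by_cases hc : c = '.'
    · subst hc
      simp only [beq_self_eq_true, if_pos]
      rw [PySem.Chars.slice_eq_listSlice, PySem.List.slice_to _ (Int.natCast_nonneg _),
          Int.toNat_natCast, List.take_left]
      have h1 : ((pre.length : Int) + 1) = ((pre ++ ['.']).length : Int) := by simp
      have h2 : pre ++ '.' :: cs = (pre ++ ['.']) ++ cs := by simp
      rw [h1, h2, ih]
      simp [dp, PySem.Set.update, Function.comp_def]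
    · have : (c == '.') = false := by simp [hc]
      simp only [this, Bool.false_eq_true, if_neg, not_false_iff]
      have h1 : ((pre.length : Int) + 1) = ((pre ++ [c]).length : Int) := by simp
      have h2 : pre ++ c :: cs = (pre ++ [c]) ++ cs := by simp
      rw [h1, h2, ih]
      simp [dp, hc, Function.comp_def]

-- the two per-address bodies agree
theorem inner_eq (anc : PySem.Set String) (addr : String) :
    (let segment := PySem.Chars.splitOn addr.toList ['.']
     let base := segment.headD []
     let anc := PySem.Set.add anc (String.ofList base)
     let st := (PySem.List.pyRange 1 (PySem.List.len segment)).foldl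
       (fun (st : PySem.Set String × List Char) i =>
         let b := st.2 ++ ['.'] ++ PySem.List.pyGetD segment i []
         (PySem.Set.add st.1 (String.ofList b), b)) (anc, base)
     st.1)
    = (let a := (PySem.List.enumerate addr.toList).foldl
         (fun anc (p : Int × Char) =>
           if p.2 == '.' then
             PySem.Set.add anc (String.ofList (PySem.Chars.slice addr.toList none (some p.1)))
           else anc) anc
       PySem.Set.add a addr) := by
  simp only []
  have hB := loopB addr.toList anc []
  simp only [List.nil_append, List.length_nil, Nat.cast_zero] at hB
  rw [hB]
  set cs := addr.toList with hcs
  rw [splitOn_eq_sp]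
  simp only [List.headD_cons]
  have hrange := PySem.List.foldl_pyRange_pyGetD ((sp cs).1 :: (sp cs).2) ([] : List Char)
      (fun (st : PySem.Set String × List Char) (s : List Char) =>
        (PySem.Set.add st.1 (String.ofList (st.2 ++ ['.'] ++ s)), st.2 ++ ['.'] ++ s))
      (PySem.Set.add anc (String.ofList (sp cs).1), (sp cs).1) (a := 1) (by omega)
  rw [hrange]
  simp only [Int.toNat_one, List.drop_succ_cons, List.drop_zero]
  rw [loopA]
  have hupd : PySem.Set.update (PySem.Set.add anc (String.ofList (sp cs).1))
      ((sj (sp cs).1 (sp cs).2).map String.ofList)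
      = PySem.Set.update anc (((sp cs).1 :: sj (sp cs).1 (sp cs).2).map String.ofList) := rfl
  rw [hupd, main_adds]
  simp [PySem.Set.update, hcs]

-- folds with pointwise-equal step functions agree
theorem foldl_ext {α β : Type} (f g : β → α → β) (h : ∀ b a, f b a = g b a) :
    ∀ (l : List α) (i : β), l.foldl f i = l.foldl g i := by
  intro l
  induction l with
  | nil => intro i; rfl
  | cons x xs ih => intro i; simp only [List.foldl]; rw [h, ih]

-- ===== VERDICT (by name: the statement is the Claim_ definition above) =====
theorem all_ancestor_spec : Claim_equal_all_ancestor := by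
  intro tree_addresses _
  unfold Spec_all_ancestor all_ancestor all_ancestor_alt
  exact foldl_ext _ _ (fun anc addr => inner_eq anc addr) tree_addresses PySem.Set.empty
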